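-- pv_equiv track=rewrite | github.com/chauvuha/lab_python_django | lab1.py | replace_first_char_occurrences
-- ===== SOURCE A (Python) =====
-- def replace_first_char_occurrences(string):
--     first_char = string[0]
--     new_string = first_char
--
--     for i in range(1, len(string)):
--         if string[i] == first_char:
--             new_string += '$'
--         else:
--             new_string += string[i]
--
--     return new_string
-- ===== SOURCE B (Python) =====
-- def replace_first_char_occurrences(string):
--     first = string[0]
--     return first + '$'.join(string[1:].split(first))
-- ===== Notes on version B (the rewrite author's own statement) =====
-- stated objective: idiomatic
-- what changed: Replaces the explicit index loop with character-by-character string accumulation by a tokenize-then-rejoin pass: split the tail on the first character and rejoin the segments with the dollar-sign placeholder as separator.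
import Mathlib
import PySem

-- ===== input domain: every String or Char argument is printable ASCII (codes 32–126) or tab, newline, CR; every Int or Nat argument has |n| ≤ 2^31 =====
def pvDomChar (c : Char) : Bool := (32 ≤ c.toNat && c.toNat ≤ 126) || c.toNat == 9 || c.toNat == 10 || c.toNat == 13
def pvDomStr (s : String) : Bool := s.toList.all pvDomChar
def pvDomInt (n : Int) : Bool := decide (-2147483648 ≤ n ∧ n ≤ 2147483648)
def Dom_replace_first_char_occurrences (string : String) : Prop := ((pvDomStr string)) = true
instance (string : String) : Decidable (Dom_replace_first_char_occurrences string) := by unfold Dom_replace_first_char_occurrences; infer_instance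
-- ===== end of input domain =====

-- B replaces A's index loop with split-on-first-char + '$'-join (idiomatic one-liner); return value only.

-- ===== PORT A =====
def replace_first_char_occurrences (string : String) : String :=
  match string.toList with
  | [] => ""   -- string[0] raises IndexError here; excluded by Pre_
  | first :: _ =>
    let cs := string.toList
    let body := (PySem.List.pyRange 1 (PySem.Str.len string) 1).foldl
      (fun ns i =>
        -- string[i]: every i in range(1, len(string)) is in range, so pyGetD is exact here
        let ch := PySem.List.pyGetD cs i ' '
        ns ++ [if ch == first then '$' else ch]) [first]
    String.mk body

-- ===== PORT B =====
def replace_first_char_occurrences_alt (string : String) : String :=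
  match string.toList with
  | [] => ""   -- string[0] raises IndexError here; excluded by Pre_
  | first :: tail =>
    String.mk (first :: PySem.Chars.join ['$'] (PySem.Chars.splitOn tail [first]))

-- ===== PRECONDITION & SPEC =====
-- A (and B) raise IndexError on the empty string (string[0]); Pre_ excludes exactly that input.
def Pre_replace_first_char_occurrences (string : String) : Prop := string ≠ ""
instance (string : String) : Decidable (Pre_replace_first_char_occurrences string) := by unfold Pre_replace_first_char_occurrences; infer_instance
def pvWitness_replace_first_char_occurrences : String := "abcab"

def Spec_replace_first_char_occurrences (string : String) (out : String) : Prop := out = replace_first_char_occurrences_alt string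
instance (string : String) (out : String) : Decidable (Spec_replace_first_char_occurrences string out) := by unfold Spec_replace_first_char_occurrences; infer_instance

-- ===== CLAIM (what is proved, stated in full; the proofs are below) =====
def Claim_equal_replace_first_char_occurrences : Prop := ∀ (string : String), Dom_replace_first_char_occurrences string → Pre_replace_first_char_occurrences string → Spec_replace_first_char_occurrences string (replace_first_char_occurrences string)

-- ===== LEMMAS AND PROOFS =====

theorem pv_inter_cons_cons (s a b : List Char) (t : List (List Char)) :
    List.intercalate s (a :: b :: t) = a ++ s ++ List.intercalate s (b :: t) := by
  simp [List.intercalate, List.intersperse]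

-- intercalate over a snoc: the separator appears before the final piece iff the prefix is nonempty
theorem pv_inter_concat (s z : List Char) : ∀ ys : List (List Char),
    List.intercalate s (ys ++ [z]) = (if ys = [] then [] else List.intercalate s ys ++ s) ++ z := by
  intro ys
  induction ys with
  | nil => simp [List.intercalate]
  | cons a t ih =>
    cases t with
    | nil => simp [pv_inter_cons_cons, List.intercalate]
    | cons b u =>
      have h1 : (a :: b :: u) ++ [z] = a :: b :: (u ++ [z]) := by simp
      have h2 : b :: (u ++ [z]) = (b :: u) ++ [z] := by simp
      rw [h1, pv_inter_cons_cons, h2, ih]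
      simp [pv_inter_cons_cons]

-- the core: join '$' of splitOn.go equals pieces-so-far ++ map of the rest
theorem pv_go_join (c : Char) :
    ∀ (fuel : Nat) (l cur : List Char) (acc : List (List Char)), l.length ≤ fuel →
    List.intercalate ['$'] (PySem.Chars.splitOn.go [c] fuel l cur acc) =
      List.intercalate ['$'] (acc.reverse ++ [cur.reverse]) ++
        l.map (fun x => if x == c then '$' else x) := by
  intro fuel
  induction fuel with
  | zero =>
    intro l cur acc h
    have hl : l = [] := List.eq_nil_of_length_eq_zero (Nat.le_zero.mp h)
    subst hl
    simp [PySem.Chars.splitOn.go]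
  | succ k ih =>
    intro l cur acc h
    cases l with
    | nil => simp [PySem.Chars.splitOn.go]
    | cons x rest =>
      by_cases hx : x = c
      · subst hx
        have hpre : [x].isPrefixOf (x :: rest) = true := by simp [List.isPrefixOf]
        rw [show PySem.Chars.splitOn.go [x] (k+1) (x :: rest) cur acc
              = PySem.Chars.splitOn.go [x] k (List.drop [x].length (x :: rest)) [] (cur.reverse :: acc) by
              simp [PySem.Chars.splitOn.go, hpre]]
        simp only [List.length_singleton, List.drop_succ_cons, List.drop_zero]
        rw [ih rest [] (cur.reverse :: acc) (by simpa using h)]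
        rw [show (cur.reverse :: acc).reverse = acc.reverse ++ [cur.reverse] by simp]
        rw [List.reverse_nil, pv_inter_concat]
        have hne : acc.reverse ++ [cur.reverse] ≠ [] := by simp
        rw [if_neg hne]
        simp
      · have hpre : [c].isPrefixOf (x :: rest) = false := by
          simp [List.isPrefixOf]
          exact fun hcx => (hx hcx.symm).elim
        rw [show PySem.Chars.splitOn.go [c] (k+1) (x :: rest) cur acc
              = PySem.Chars.splitOn.go [c] k rest (x :: cur) acc by
              simp [PySem.Chars.splitOn.go, hpre]]
        rw [ih rest (x :: cur) acc (by simpa using h)]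
        rw [pv_inter_concat, pv_inter_concat]
        simp only [List.map_cons, beq_iff_eq, if_neg hx]
        simp

theorem pv_join_splitOn (c : Char) (tail : List Char) :
    PySem.Chars.join ['$'] (PySem.Chars.splitOn tail [c]) =
      tail.map (fun x => if x == c then '$' else x) := by
  unfold PySem.Chars.join PySem.Chars.splitOn
  rw [pv_go_join c (tail.length + 1) tail [] [] (Nat.le_succ _)]
  simp [List.intercalate]

-- A's loop, after foldl_pyRange_pyGetD', is a plain foldl over the tail; it builds the map
theorem pv_foldl_map (c : Char) (tail : List Char) :
    ∀ acc : List Char,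
    tail.foldl (fun ns ch => ns ++ [if ch == c then '$' else ch]) acc
      = acc ++ tail.map (fun x => if x == c then '$' else x) := by
  induction tail with
  | nil => intro acc; simp
  | cons x rest ih =>
    intro acc
    rw [List.foldl_cons, ih]
    simp

-- ===== VERDICT (by name: the statement is the Claim_ definition above) =====
theorem replace_first_char_occurrences_spec : Claim_equal_replace_first_char_occurrences := by
  intro string _ hpre
  unfold Spec_replace_first_char_occurrences
  unfold replace_first_char_occurrences replace_first_char_occurrences_alt
  cases hcs : string.toList with
  | nil =>
    exact absurd (String.toList_eq_nil_iff.mp hcs) hpre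
  | cons first tail =>
    simp only
    rw [pv_join_splitOn]
    congr 1
    have hlen : PySem.Str.len string = ((first :: tail).length : Int) := by
      simp [hcs]
    rw [hlen]
    have h := PySem.List.foldl_pyRange_pyGetD' (first :: tail) ' '
      (fun ns ch => ns ++ [if ch == first then '$' else ch]) [first]
      (show (0:Int) ≤ 1 by norm_num)
    refine h.trans ?_
    simp only [Int.toNat_one, List.drop_succ_cons, List.drop_zero]
    rw [pv_foldl_map]
    rfl
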